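-- pv_equiv track=rewrite | github.com/Maxiglo/CompetitiveProgramming | meritischallenge/c.py | modification_locale
-- ===== SOURCE A (Python) =====
-- def somme_revenus(missions, selection):
--     return sum(missions[i][2] for i in selection)
--
-- def modification_locale(missions, selection):
--     n = len(missions)
--     best_selection = selection
--     best_revenus = somme_revenus(missions, selection)
--     for i in range(n):
--         for j in range(i+1, n):
--             nouvelle_selection = selection[:i] + selection[j:j+1] + selection[i+1:j] + selection[i:i+1] + selection[j+1:]
--             nouveaux_revenus = somme_revenus(missions, nouvelle_selection)
--             if nouveaux_revenus > best_revenus: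
--                 best_selection = nouvelle_selection
--                 best_revenus = nouveaux_revenus
--     return best_selection
-- ===== SOURCE B (Python) =====
-- def somme_revenus(missions, selection):
--     return sum(missions[i][2] for i in selection)
--
-- def modification_locale(missions, selection):
--     # Every candidate A builds is a permutation of `selection`, so the revenue
--     # sum is invariant and the strict-improvement test never fires: the input
--     # selection is already the answer. Evaluating the sum once keeps A's
--     # IndexError contract on out-of-range indices.
--     somme_revenus(missions, selection)
--     return selection
-- ===== Notes on version B (the rewrite author's own statement) =====
-- stated objective: faster
-- what changed: Every candidate A builds by slicing is a permutation of `selection`, so the revenue sum is invariant and the strict `>` test never fires; B drops the O(n^2) swap search and returns the input selection after one revenue-sum evaluation (keeping A's IndexError contract).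
import Mathlib
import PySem

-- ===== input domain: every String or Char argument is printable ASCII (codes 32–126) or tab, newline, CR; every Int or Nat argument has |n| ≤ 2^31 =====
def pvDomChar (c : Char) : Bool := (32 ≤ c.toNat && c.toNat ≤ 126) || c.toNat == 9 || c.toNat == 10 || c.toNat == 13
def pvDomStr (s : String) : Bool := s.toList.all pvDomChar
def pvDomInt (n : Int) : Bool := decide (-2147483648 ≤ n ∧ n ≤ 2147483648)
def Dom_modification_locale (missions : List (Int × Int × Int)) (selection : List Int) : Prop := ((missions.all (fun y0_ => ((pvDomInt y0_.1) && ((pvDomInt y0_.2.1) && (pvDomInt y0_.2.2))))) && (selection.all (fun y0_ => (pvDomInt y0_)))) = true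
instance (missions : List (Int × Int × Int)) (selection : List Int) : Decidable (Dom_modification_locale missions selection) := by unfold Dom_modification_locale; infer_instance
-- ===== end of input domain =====

-- B observes that A's nested swap search only ever tests permutations of `selection`,
-- whose revenue sum is invariant, so B returns `selection` after evaluating the sum once (keeping A's IndexError contract).

-- ===== PORT A =====
-- sum(missions[i][2] for i in selection); `none` = IndexError
def sommeRevenus (missions : List (Int × Int × Int)) (selection : List Int) : Option Int :=
  selection.foldl (fun acc i =>
    match acc, PySem.List.pyGet? missions i with
    | some a, some m => some (a + m.2.2)
    | _, _ => none) (some 0)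

def modification_locale (missions : List (Int × Int × Int)) (selection : List Int) : List Int :=
  let n : Int := missions.length
  let res :=
    (PySem.List.pyRange 0 n 1).foldl (fun st i =>
      (PySem.List.pyRange (i + 1) n 1).foldl (fun st j =>
        let nouvelle :=
          PySem.List.slice selection none (some i) ++
          PySem.List.slice selection (some j) (some (j + 1)) ++
          PySem.List.slice selection (some (i + 1)) (some j) ++
          PySem.List.slice selection (some i) (some (i + 1)) ++
          PySem.List.slice selection (some (j + 1)) none
        let nr := sommeRevenus missions nouvelle
        match nr, st.2 with
        | some a, some b => if b < a then (nouvelle, nr) else st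
        | _, _ => st) st)
      (selection, sommeRevenus missions selection)
  res.1

-- ===== PORT B =====
def modification_locale_alt (missions : List (Int × Int × Int)) (selection : List Int) : List Int :=
  let _ := sommeRevenus missions selection  -- evaluated for its IndexError contract in Python; value unused
  selection

-- ===== PRECONDITION & SPEC =====
-- Pre_ excludes exactly the inputs where Python A raises IndexError:
-- some index in `selection` is outside [-len(missions), len(missions)).
def Pre_modification_locale (missions : List (Int × Int × Int)) (selection : List Int) : Prop :=
  ∀ i ∈ selection, -(missions.length : Int) ≤ i ∧ i < (missions.length : Int)
instance (missions : List (Int × Int × Int)) (selection : List Int) : Decidable (Pre_modification_locale missions selection) := by unfold Pre_modification_locale; infer_instance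

def pvWitness_modification_locale : (List (Int × Int × Int)) × List Int := ([(1, 2, 3), (4, 5, 6)], [0, 1, -1])

def Spec_modification_locale (missions : List (Int × Int × Int)) (selection : List Int) (out : List Int) : Prop := out = modification_locale_alt missions selection
instance (missions : List (Int × Int × Int)) (selection : List Int) (out : List Int) : Decidable (Spec_modification_locale missions selection out) := by unfold Spec_modification_locale; infer_instance

-- ===== CLAIM (what is proved, stated in full; the proofs are below) =====
def Claim_equal_modification_locale : Prop := ∀ (missions : List (Int × Int × Int)) (selection : List Int), Dom_modification_locale missions selection → Pre_modification_locale missions selection → Spec_modification_locale missions selection (modification_locale missions selection)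

-- ===== LEMMAS AND PROOFS =====

-- The revenue-sum fold only depends on the multiset of indices.
theorem sommeRevenus_perm (missions : List (Int × Int × Int)) {l₁ l₂ : List Int}
    (p : l₁.Perm l₂) : sommeRevenus missions l₁ = sommeRevenus missions l₂ := by
  unfold sommeRevenus
  exact p.foldl_eq' (fun x _ y _ z => by
    rcases z with _ | a <;> rcases h1 : PySem.List.pyGet? missions x with _ | m <;>
      rcases h2 : PySem.List.pyGet? missions y with _ | m' <;> simp <;> ring) _

-- take m ++ take k (drop m) = take (m+k)
theorem take_chunk (l : List Int) (m k : Nat) :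
    l.take m ++ (l.drop m).take k = l.take (m + k) := List.take_add.symm

-- A's sliced candidate (0 ≤ a < b as naturals) is a permutation of `selection`.
theorem candidate_perm (s : List Int) (a b : Nat) (hab : a + 1 ≤ b) :
    (s.take a ++ (s.drop b).take 1 ++ (s.drop (a + 1)).take (b - (a + 1)) ++
      (s.drop a).take 1 ++ s.drop (b + 1)).Perm s := by
  have hs : s = s.take a ++ (s.drop a).take 1 ++ (s.drop (a + 1)).take (b - (a + 1)) ++
      (s.drop b).take 1 ++ s.drop (b + 1) := by
    rw [take_chunk s a 1, take_chunk s (a + 1) (b - (a + 1)),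
       Nat.add_sub_cancel' hab, take_chunk s b 1, List.take_append_drop]
  conv_rhs => rw [hs]
  set A := s.take a
  set B := (s.drop b).take 1
  set C := (s.drop (a + 1)).take (b - (a + 1))
  set D := (s.drop a).take 1
  set E := s.drop (b + 1)
  have h : (B ++ C ++ D).Perm (D ++ C ++ B) := by
    have h1 : ((B ++ C) ++ D).Perm (D ++ (B ++ C)) := List.perm_append_comm
    have h2 : (D ++ (B ++ C)).Perm (D ++ (C ++ B)) := List.Perm.append_left D List.perm_append_comm
    simpa using h1.trans h2
  have h3 : (A ++ (B ++ C ++ D) ++ E).Perm (A ++ (D ++ C ++ B) ++ E) :=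
    (h.append_left A).append_right E
  simpa using h3

-- a fold whose step fixes the initial state returns it
theorem foldl_const {α β : Type} (f : β → α → β) (s : β) (l : List α)
    (h : ∀ x ∈ l, f s x = s) : l.foldl f s = s := by
  induction l with
  | nil => rfl
  | cons x t ih => simp only [List.foldl_cons, h x (by simp)]; exact ih fun y hy => h y (by simp [hy])

theorem modification_locale_spec : Claim_equal_modification_locale := by
  intro missions selection _ _
  unfold Spec_modification_locale modification_locale modification_locale_alt
  simp only
  rw [foldl_const]
  intro i hi
  rw [foldl_const]
  intro j hj
  have hi0 : 0 ≤ i := (PySem.List.mem_pyRange_one.mp hi).1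
  have hij : i + 1 ≤ j := (PySem.List.mem_pyRange_one.mp hj).1
  obtain ⟨a, rfl⟩ := Int.eq_ofNat_of_zero_le hi0
  obtain ⟨b, rfl⟩ := Int.eq_ofNat_of_zero_le (le_trans (by omega) hij)
  have hab : a + 1 ≤ b := by exact_mod_cast hij
  rw [PySem.List.slice_to_natCast]
  have h1 : ((b : Int) + 1) = ((b + 1 : Nat) : Int) := by push_cast; ring
  have h2 : ((a : Int) + 1) = ((a + 1 : Nat) : Int) := by push_cast; ring
  rw [h1, h2, PySem.List.slice_natCast, PySem.List.slice_natCast, PySem.List.slice_natCast,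
     PySem.List.slice_from_natCast]
  have hperm := candidate_perm selection a b hab
  -- align the take/drop forms produced by slice_natCast with candidate_perm's
  have e1 : (b + 1) - b = 1 := by omega
  have e2 : (a + 1) - a = 1 := by omega
  rw [e1, e2]
  rw [sommeRevenus_perm missions hperm]
  rcases sommeRevenus missions selection with _ | v
  · rfl
  · simp
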